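-- pv_equiv track=rewrite | github.com/ByeonSeungHa/Python | Busan Study/60.py | solution
-- ===== SOURCE A (Python) =====
-- def solution(num_apple, num_carrot, k):
--     answer = 0
--
--     if num_apple < num_carrot * 3:
--         answer = num_apple // 3
--     else:
--         answer = num_carrot
--
--     num_apple -= answer * 3
--     num_carrot -= answer
--
--     i = 0
--     k = k - (num_apple + num_carrot)
--     while k > 0:
--         if i % 4 == 0:
--             answer -= 1
--         i = i + 1
--         k = k - 1
--
--     return answer
-- ===== SOURCE B (Python) =====
-- def solution(num_apple, num_carrot, k):
--     if num_apple < num_carrot * 3: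
--         answer = num_apple // 3
--     else:
--         answer = num_carrot
--     d = k - (num_apple - answer * 3) - (num_carrot - answer)
--     if d > 0:
--         answer -= (d - 1) // 4 + 1
--     return answer
-- ===== Notes on version B (the rewrite author's own statement) =====
-- stated objective: simpler
-- what changed: Replaces A's while-loop that walks d = k - leftover steps decrementing answer on every fourth step by the closed form answer -= (d-1)//4 + 1 when d > 0.
import Mathlib
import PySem

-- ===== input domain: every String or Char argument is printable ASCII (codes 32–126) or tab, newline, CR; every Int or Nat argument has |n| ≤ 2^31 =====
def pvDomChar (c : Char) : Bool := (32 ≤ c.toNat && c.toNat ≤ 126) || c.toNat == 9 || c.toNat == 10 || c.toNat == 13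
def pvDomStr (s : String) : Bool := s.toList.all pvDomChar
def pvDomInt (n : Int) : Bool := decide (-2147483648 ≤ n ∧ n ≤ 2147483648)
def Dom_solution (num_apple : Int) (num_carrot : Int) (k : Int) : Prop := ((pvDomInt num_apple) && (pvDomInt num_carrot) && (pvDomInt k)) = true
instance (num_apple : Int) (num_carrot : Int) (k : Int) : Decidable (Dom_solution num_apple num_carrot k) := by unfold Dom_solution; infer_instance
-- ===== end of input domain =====

-- B replaces A's while-loop by the closed form answer -= (d-1)//4 + 1 when d > 0 (simpler).

-- ===== PORT A =====
-- the while loop of A: state (i, k, answer)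
def solutionLoop (i : Int) (k : Int) (answer : Int) : Int :=
  if _h : k > 0 then
    solutionLoop (i + 1) (k - 1) (if PySem.Int.mod i 4 = 0 then answer - 1 else answer)
  else answer
termination_by k.toNat
decreasing_by omega

def solution (num_apple : Int) (num_carrot : Int) (k : Int) : Int :=
  let answer := if num_apple < num_carrot * 3 then PySem.Int.floordiv num_apple 3 else num_carrot
  let num_apple := num_apple - answer * 3
  let num_carrot := num_carrot - answer
  solutionLoop 0 (k - (num_apple + num_carrot)) answer

-- ===== PORT B =====
def solution_alt (num_apple : Int) (num_carrot : Int) (k : Int) : Int :=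
  let answer := if num_apple < num_carrot * 3 then PySem.Int.floordiv num_apple 3 else num_carrot
  let d := k - (num_apple - answer * 3) - (num_carrot - answer)
  if d > 0 then answer - (PySem.Int.floordiv (d - 1) 4 + 1) else answer

-- ===== PRECONDITION & SPEC =====
def Spec_solution (num_apple : Int) (num_carrot : Int) (k : Int) (out : Int) : Prop := out = solution_alt num_apple num_carrot k
instance (num_apple : Int) (num_carrot : Int) (k : Int) (out : Int) : Decidable (Spec_solution num_apple num_carrot k out) := by unfold Spec_solution; infer_instance

-- ===== CLAIM (what is proved, stated in full; the proofs are below) =====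
def Claim_equal_solution : Prop := ∀ (num_apple : Int) (num_carrot : Int) (k : Int), Dom_solution num_apple num_carrot k → Spec_solution num_apple num_carrot k (solution num_apple num_carrot k)

-- ===== LEMMAS AND PROOFS =====

-- the loop subtracts the number of multiples of 4 in [i, i+k)
theorem solutionLoop_closed (i k answer : Int) (hi : 0 ≤ i) :
    solutionLoop i k answer = answer - ((i + max k 0 + 3) / 4 - (i + 3) / 4) := by
  induction i, k, answer using solutionLoop.induct with
  | case1 i k answer h ih =>
    rw [solutionLoop, dif_pos h]
    simp only [dite_eq_ite] at ih
    rw [ih (by omega)]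
    have hmod : PySem.Int.mod i 4 = i % 4 := PySem.Int.mod_eq_emod_of_pos (by omega)
    split_ifs with hz
    · rw [hmod] at hz; omega
    · rw [hmod] at hz; omega
  | case2 i k answer h =>
    rw [solutionLoop, dif_neg h]; omega

theorem solution_spec : Claim_equal_solution := by
  intro na nc k _
  unfold Spec_solution solution solution_alt
  simp only
  set answer := if na < nc * 3 then PySem.Int.floordiv na 3 else nc with hA
  have hd : k - (na - answer * 3 + (nc - answer)) = k - (na - answer * 3) - (nc - answer) := by ring
  rw [hd]
  set d := k - (na - answer * 3) - (nc - answer) with hD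
  rw [solutionLoop_closed 0 d answer le_rfl]
  split_ifs with hpos
  · rw [show PySem.Int.floordiv (d-1) 4 = (d-1)/4 from PySem.Int.floordiv_eq_ediv_of_pos (by omega)]; omega
  · omega
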